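-- pv_equiv track=rewrite | github.com/Parvfect/DialoGPT | extract_conversation_json.py | clean_known_errors
-- ===== SOURCE A (Python) =====
-- def clean_known_errors(line):
--     """Cleans - message is deleted, video omitted , etc """
--
--     arr = [
--         'Missed voice call',
--         'video omitted',
--         'This message was deleted',
--         'document omitted',
--         'https',
--         'Missed video call',
--         'http'
--     ]
--
--     for i in arr:
--         if line.find(i) != -1:
--             return ""
--
--     return line
-- ===== SOURCE B (Python) =====
-- _PATTERNS = (
--     'Missed voice call',
--     'video omitted',
--     'This message was deleted',
--     'document omitted',
--     'https',
--     'Missed video call',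
--     'http',
-- )
--
-- def clean_known_errors(line):
--     """Single left-to-right scan: at each position, test whether any known
--     error pattern starts there; blank the line on the first hit."""
--     for i in range(len(line)):
--         if any(line.startswith(p, i) for p in _PATTERNS):
--             return ""
--     return line
-- ===== Notes on version B (the rewrite author's own statement) =====
-- stated objective: alternative
-- what changed: Replaces seven independent whole-line find() scans with one left-to-right pass over the positions of the line, testing at each position whether any pattern starts there.
import Mathlib
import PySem

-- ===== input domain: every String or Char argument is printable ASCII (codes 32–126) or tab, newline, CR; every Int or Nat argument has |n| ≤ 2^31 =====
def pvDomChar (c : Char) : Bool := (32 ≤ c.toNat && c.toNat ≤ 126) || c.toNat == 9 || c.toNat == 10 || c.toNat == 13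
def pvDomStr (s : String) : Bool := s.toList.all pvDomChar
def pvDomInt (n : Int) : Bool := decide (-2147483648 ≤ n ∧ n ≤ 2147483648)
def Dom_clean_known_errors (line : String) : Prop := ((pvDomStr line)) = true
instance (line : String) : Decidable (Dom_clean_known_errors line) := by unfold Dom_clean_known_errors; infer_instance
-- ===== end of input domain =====

-- B replaces seven independent whole-line find() scans with a single left-to-right pass
-- over the positions of the line, testing at each position whether any pattern starts
-- there (objective: alternative).

-- ===== PORT A =====
def pvArr : List String :=
  ["Missed voice call", "video omitted", "This message was deleted",
   "document omitted", "https", "Missed video call", "http"]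

-- the 'for i in arr: if line.find(i) != -1: return ""' loop
def pvLoopA (line : String) : List String → String
  | [] => line
  | i :: rest => if PySem.Str.find line i ≠ -1 then "" else pvLoopA line rest

def clean_known_errors (line : String) : String :=
  pvLoopA line pvArr

-- ===== PORT B =====
def pvPats : List (List Char) :=
  ["Missed voice call".toList, "video omitted".toList, "This message was deleted".toList,
   "document omitted".toList, "https".toList, "Missed video call".toList, "http".toList]

-- 'any(s.startswith(p) for p in _PATTERNS)'
def pvHere (s : List Char) : Bool :=
  pvPats.any (fun p => PySem.Chars.startswith s p)

-- the 'while s: … s = s[1:]' scan, returning whether a pattern was found at some position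
def pvScan : List Char → Bool
  | [] => false
  | c :: rest => pvHere (c :: rest) || pvScan rest

def clean_known_errors_alt (line : String) : String :=
  if pvScan line.toList then "" else line

-- ===== PRECONDITION & SPEC =====
def Spec_clean_known_errors (line : String) (out : String) : Prop := out = clean_known_errors_alt line
instance (line : String) (out : String) : Decidable (Spec_clean_known_errors line out) := by
  unfold Spec_clean_known_errors; infer_instance

-- ===== CLAIM =====
def Claim_equal_clean_known_errors : Prop :=
  ∀ (line : String), Dom_clean_known_errors line → Spec_clean_known_errors line (clean_known_errors line)

-- ===== LEMMAS AND PROOFS =====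

-- pvScan finds a pattern iff some pattern is a prefix of some suffix
theorem pvScan_iff (s : List Char) :
    pvScan s = true ↔ ∃ p ∈ pvPats, ∃ j, p <+: s.drop j := by
  induction s with
  | nil =>
    simp [pvScan, pvPats]
  | cons c rest ih =>
    simp only [pvScan, Bool.or_eq_true, ih, pvHere, List.any_eq_true]
    constructor
    · rintro (⟨p, hp, hpre⟩ | ⟨p, hp, j, hpre⟩)
      · exact ⟨p, hp, 0, by simpa [PySem.Chars.startswith_iff] using hpre⟩
      · exact ⟨p, hp, j + 1, by simpa using hpre⟩
    · rintro ⟨p, hp, j, hpre⟩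
      cases j with
      | zero => exact Or.inl ⟨p, hp, by simpa [PySem.Chars.startswith_iff] using hpre⟩
      | succ j => exact Or.inr ⟨p, hp, j, by simpa using hpre⟩

-- A's loop returns "" iff some pattern of arr is an infix of line, else returns line
theorem pvLoopA_iff (line : String) (arr : List String) :
    pvLoopA line arr = (if ∃ i ∈ arr, i.toList <:+: line.toList then "" else line) := by
  induction arr with
  | nil => simp [pvLoopA]
  | cons i rest ih =>
    by_cases h : i.toList <:+: line.toList
    · have hne : PySem.Chars.find line.toList i.toList ≠ -1 :=
        (PySem.Chars.find_ne_neg_one_iff _ _).mpr h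
      simp [pvLoopA, hne, h]
    · have heq : PySem.Chars.find line.toList i.toList = -1 :=
        (PySem.Chars.find_eq_neg_one_iff _ _).mpr h
      simp [pvLoopA, heq, ih, h]

-- B's pattern list is A's list of strings, char-listed
theorem pvPats_eq : pvPats = pvArr.map String.toList := by rfl

theorem clean_known_errors_spec : Claim_equal_clean_known_errors := by
  intro line _
  unfold Spec_clean_known_errors clean_known_errors clean_known_errors_alt
  rw [pvLoopA_iff]
  have hiff : (∃ i ∈ pvArr, i.toList <:+: line.toList) ↔ pvScan line.toList = true := by
    rw [pvScan_iff]
    constructor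
    · rintro ⟨i, hi, hinf⟩
      refine ⟨i.toList, by rw [pvPats_eq]; exact List.mem_map_of_mem hi, ?_⟩
      exact (PySem.Chars.exists_prefix_drop_iff_isIn _ _).mpr
        ((PySem.Chars.isIn_iff_infix _ _).mpr hinf)
    · rintro ⟨p, hp, j, hpre⟩
      have hinf : p <:+: line.toList :=
        (PySem.Chars.isIn_iff_infix _ _).mp
          ((PySem.Chars.exists_prefix_drop_iff_isIn _ _).mp ⟨j, hpre⟩)
      rw [pvPats_eq, List.mem_map] at hp
      obtain ⟨i, hi, rfl⟩ := hp
      exact ⟨i, hi, hinf⟩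
  by_cases h : pvScan line.toList = true
  · simp [h, hiff.mpr h]
  · have hno : ¬ ∃ i ∈ pvArr, i.toList <:+: line.toList := fun hx => h (hiff.mp hx)
    simp [h, hno]
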